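-- pv_equiv track=rewrite | github.com/A-AR-R/ADB-Project | PermutionAlgorithms.py | sattoloCycle
-- ===== SOURCE A (Python) =====
-- def sattoloCycle(items,keyword):
--     i = len(items)
--     l=list(items)
--     keyword_sorted=sorted(keyword)
--     key_list=[]
--     for item in keyword:
--         key_list.append(keyword_sorted.index(item))
--     for key in key_list:
--         i = i - 1
--         l[key],l[i] = l[i],l[key]
--     return l
-- ===== SOURCE B (Python) =====
-- def sattoloCycle(items, keyword):
--     # counting-sort ranks: histogram over the byte alphabet, no sorting and no
--     # comparisons -- rank of ch = number of keyword characters in smaller bins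
--     counts = [0] * 256
--     for ch in keyword:
--         counts[ord(ch)] += 1
--     l = list(items)
--     i = len(l)
--     for ch in keyword:
--         i -= 1
--         key = sum(counts[:ord(ch)])
--         l[key], l[i] = l[i], l[key]
--     return l
-- ===== Notes on version B (the rewrite author's own statement) =====
-- stated objective: faster
-- what changed: B replaces A's comparison sort plus per-character linear .index scans by a counting-sort rank computation: one histogram pass over a 256-slot byte table, each swap key read off as the sum of the smaller bins, with no sorting, no comparisons and no staged key_list.
import Mathlib
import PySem

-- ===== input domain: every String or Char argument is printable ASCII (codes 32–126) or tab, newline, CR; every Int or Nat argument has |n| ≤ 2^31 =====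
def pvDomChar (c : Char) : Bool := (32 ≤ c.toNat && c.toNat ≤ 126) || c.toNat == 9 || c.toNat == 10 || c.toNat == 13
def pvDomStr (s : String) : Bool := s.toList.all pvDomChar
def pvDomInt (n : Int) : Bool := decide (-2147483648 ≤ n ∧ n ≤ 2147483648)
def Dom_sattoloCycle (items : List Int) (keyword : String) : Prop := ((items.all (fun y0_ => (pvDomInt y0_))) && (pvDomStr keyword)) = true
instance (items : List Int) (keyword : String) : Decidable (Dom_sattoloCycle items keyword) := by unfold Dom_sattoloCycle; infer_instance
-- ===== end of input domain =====

-- B replaces A's sort + per-character .index scans by counting-sort ranks (byte histogram, swap key = sum of smaller bins); measured faster in a timing run.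

-- ===== PORT A =====
-- shared swap statement: l[key], l[i] = l[i], l[key]  (identical in both Pythons;
-- pyGetD/pySetD are exact for the in-range — possibly negative — indices Pre_ guarantees)
def pvSwapStep (st : List Int × Int) (key : Int) : List Int × Int :=
  let i := st.2 - 1
  let a := PySem.List.pyGetD st.1 i 0
  let b := PySem.List.pyGetD st.1 key 0
  (PySem.List.pySetD (PySem.List.pySetD st.1 key a) i b, i)

def sattoloCycle (items : List Int) (keyword : String) : List Int :=
  let i : Int := items.length
  let l := items
  let keyword_sorted := PySem.List.sorted keyword.toList (fun c => c) false
  -- .index(item) always succeeds (item ∈ keyword_sorted), so the ValueError default is dead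
  let key_list := keyword.toList.foldl
    (fun acc item => acc ++ [(((PySem.List.index? keyword_sorted item).getD 0 : Nat) : Int)]) []
  (key_list.foldl pvSwapStep (l, i)).1

-- ===== PORT B =====
def sattoloCycle_alt (items : List Int) (keyword : String) : List Int :=
  -- counts = [0]*256; for ch in keyword: counts[ord(ch)] += 1
  let counts := keyword.toList.foldl
    (fun cs ch => PySem.List.pySetD cs ((ch.toNat : Int))
        (PySem.List.pyGetD cs ((ch.toNat : Int)) 0 + 1))
    (List.replicate 256 (0 : Int))
  -- for ch in keyword: i -= 1; key = sum(counts[:ord(ch)]); swap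
  (keyword.toList.foldl
    (fun st ch => pvSwapStep st (PySem.List.slice counts none (some ((ch.toNat : Int)))).sum)
    (items, (items.length : Int))).1

-- ===== PRECONDITION & SPEC =====
-- Pre_ is exactly where Python A returns: it raises IndexError when the running index i
-- falls below -len(items) (len(keyword) > 2*len(items)) or when some rank key ≥ len(items).
def Pre_sattoloCycle (items : List Int) (keyword : String) : Prop :=
  (decide (keyword.toList.length ≤ 2 * items.length) &&
   keyword.toList.all (fun c =>
     decide (keyword.toList.countP (fun x => decide (x < c)) < items.length))) = true
instance (items : List Int) (keyword : String) : Decidable (Pre_sattoloCycle items keyword) := by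
  unfold Pre_sattoloCycle; infer_instance

def pvWitness_sattoloCycle : List Int × String := ([1, 2, 3], "ab")

def Spec_sattoloCycle (items : List Int) (keyword : String) (out : List Int) : Prop := out = sattoloCycle_alt items keyword
instance (items : List Int) (keyword : String) (out : List Int) : Decidable (Spec_sattoloCycle items keyword out) := by unfold Spec_sattoloCycle; infer_instance

-- ===== CLAIM (what is proved, stated in full; the proofs are below) =====
def Claim_equal_sattoloCycle : Prop := ∀ (items : List Int) (keyword : String), Dom_sattoloCycle items keyword → Pre_sattoloCycle items keyword → Spec_sattoloCycle items keyword (sattoloCycle items keyword)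

-- ===== LEMMAS AND PROOFS =====

-- in a ≤-sorted list, the first index of c is the number of elements strictly below c
theorem pv_idx_sorted_eq_count {s : List Char} (hp : s.Pairwise (· ≤ ·)) {c : Char} (hc : c ∈ s) :
    (PySem.List.index? s c).getD 0 = s.countP (fun x => decide (x < c)) := by
  induction s with
  | nil => cases hc
  | cons x t ih =>
    rcases List.pairwise_cons.mp hp with ⟨hx, hp'⟩
    by_cases hxc : x = c
    · subst hxc
      have h0 : t.countP (fun y => decide (y < x)) = 0 := by
        apply List.countP_eq_zero.mpr
        intro y hy
        simpa using not_lt.mpr (hx y hy)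
      rw [PySem.List.index?_cons_self]
      simp [h0]
    · have hct : c ∈ t := by
        rcases List.mem_cons.mp hc with h | h
        · exact absurd h.symm hxc
        · exact h
      have hlt : x < c := lt_of_le_of_ne (hx c hct) hxc
      obtain ⟨k, hk⟩ := Option.isSome_iff_exists.mp ((PySem.List.index?_isSome_iff t c).mpr hct)
      have ht := ih hp' hct
      rw [PySem.List.index?_cons_of_ne t hxc, hk]
      rw [hk] at ht
      simp only [Option.getD_some, Option.map_some] at ht ⊢
      simp [hlt, ← ht]

-- A's first pass builds the list of ranks: ks.map (countP strictly-less)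
theorem pv_keys_eq (ks : List Char) :
    ks.foldl (fun acc item =>
        acc ++ [(((PySem.List.index? (PySem.List.sorted ks (fun c => c) false) item).getD 0 : Nat) : Int)]) []
      = ks.map (fun item => ((ks.countP (fun x => decide (x < item)) : Nat) : Int)) := by
  rw [PySem.List.foldl_append_singleton_eq_map]
  apply List.map_congr_left
  intro c hc
  congr 1
  have hperm : (PySem.List.sorted ks (fun c => c) false).Perm ks := PySem.List.sorted_perm ..
  have hpw : (PySem.List.sorted ks (fun c => c) false).Pairwise (· ≤ ·) := by
    simpa using PySem.List.sorted_pairwise (xs := ks) (key := fun c => c)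
  have hmem : c ∈ PySem.List.sorted ks (fun c => c) false :=
    (PySem.List.mem_sorted ks (fun c => c) false c).mpr hc
  rw [pv_idx_sorted_eq_count hpw hmem]
  exact hperm.countP_eq _

-- the histogram step written with set/getD (what pySetD/pyGetD reduce to on a Nat index)
theorem pv_hist_len (ks : List Char) (cs : List Int) :
    (ks.foldl (fun cs ch => PySem.List.pySetD cs ((ch.toNat : Int))
        (PySem.List.pyGetD cs ((ch.toNat : Int)) 0 + 1)) cs).length = cs.length := by
  induction ks generalizing cs with
  | nil => rfl
  | cons x t ih =>
    rw [List.foldl_cons, ih]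
    simp

-- pointwise value of the histogram: initial entry plus the multiplicity of the bin
theorem pv_step_eq :
    (fun (cs : List Int) (ch : Char) => PySem.List.pySetD cs ((ch.toNat : Int))
        (PySem.List.pyGetD cs ((ch.toNat : Int)) 0 + 1))
      = fun (cs : List Int) (ch : Char) => cs.set ch.toNat (cs.getD ch.toNat 0 + 1) := by
  funext cs ch
  rw [PySem.List.pyGetD_natCast, PySem.List.pySetD_natCast]

-- pointwise value of the histogram: initial entry plus the multiplicity of the bin
theorem pv_hist_getD (ks : List Char) (cs : List Int)
    (hks : ∀ ch ∈ ks, ch.toNat < cs.length) : ∀ c : Nat, c < cs.length →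
    (ks.foldl (fun cs ch => cs.set ch.toNat (cs.getD ch.toNat 0 + 1)) cs).getD c 0
      = cs.getD c 0 + (ks.countP (fun x => decide (x.toNat = c)) : Int) := by
  induction ks generalizing cs with
  | nil => intro c hc; simp
  | cons x t ih =>
    intro c hc
    have hx : x.toNat < cs.length := hks x List.mem_cons_self
    have ht : ∀ ch ∈ t, ch.toNat < (cs.set x.toNat (cs.getD x.toNat 0 + 1)).length := by
      intro ch hch; simpa using hks ch (List.mem_cons_of_mem _ hch)
    rw [List.foldl_cons, ih _ ht c (by simpa using hc), List.countP_cons]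
    by_cases hxc : x.toNat = c
    · subst hxc
      rw [List.getD_eq_getElem _ _ (by simpa using hc), List.getElem_set_self,
          List.getD_eq_getElem _ _ hc]
      simp only [decide_eq_true_eq]
      push_cast
      ring
    · have hset : (cs.set x.toNat (cs.getD x.toNat 0 + 1)).getD c 0 = cs.getD c 0 := by
        rw [List.getD_eq_getElem _ _ (by simpa using hc), List.getElem_set_ne (by omega),
            List.getD_eq_getElem _ _ hc]
      rw [hset]
      simp [hxc]

-- counting below a bound splits off the top bin
theorem pv_count_lt_succ (ks : List Char) (b : Nat) :
    ks.countP (fun x => decide (x.toNat < b + 1))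
      = ks.countP (fun x => decide (x.toNat < b)) + ks.countP (fun x => decide (x.toNat = b)) := by
  induction ks with
  | nil => rfl
  | cons x t ih =>
    simp only [List.countP_cons, ih, decide_eq_true_eq]
    split_ifs <;> omega

-- the prefix sum of the histogram counts the strictly smaller bins
theorem pv_prefix_sum (ks : List Char) (hks : ∀ ch ∈ ks, ch.toNat < 256)
    (b : Nat) (hb : b ≤ 256) :
    ((ks.foldl (fun cs ch => cs.set ch.toNat (cs.getD ch.toNat 0 + 1)) (List.replicate 256 (0 : Int))).take b).sum
      = (ks.countP (fun x => decide (x.toNat < b)) : Int) := by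
  induction b with
  | zero =>
    rw [List.take_zero, List.sum_nil]
    have h0 : ks.countP (fun x => decide (x.toNat < 0)) = 0 :=
      List.countP_eq_zero.mpr (by intro a _; simp)
    rw [h0, Nat.cast_zero]
  | succ b ih =>
    have hb' : b ≤ 256 := Nat.le_of_succ_le hb
    have hlen : (ks.foldl (fun cs ch => cs.set ch.toNat (cs.getD ch.toNat 0 + 1))
        (List.replicate 256 (0 : Int))).length = 256 := by
      rw [← pv_step_eq, pv_hist_len, List.length_replicate]
    have hblt : b < (ks.foldl (fun cs ch => cs.set ch.toNat (cs.getD ch.toNat 0 + 1))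
        (List.replicate 256 (0 : Int))).length := by
      omega
    rw [List.take_add_one, List.sum_append, ih hb', List.getElem?_eq_getElem hblt]
    have hget := pv_hist_getD ks (List.replicate 256 (0 : Int))
      (by rw [List.length_replicate]; exact hks) b (by rw [List.length_replicate]; omega)
    rw [List.getD_eq_getElem _ _ hblt] at hget
    simp only [Option.toList_some, List.sum_cons, List.sum_nil, add_zero, hget]
    rw [pv_count_lt_succ]
    have h0 : (List.replicate 256 (0 : Int)).getD b 0 = 0 := by
      rw [List.getD_eq_getElem _ _ (by rw [List.length_replicate]; omega)]
      exact List.getElem_replicate ..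
    rw [h0]
    push_cast
    ring

-- B's swap key equals the strictly-less count (Char order is codepoint order)
theorem pv_key_eq (ks : List Char) (hks : ∀ ch ∈ ks, ch.toNat < 256) (ch : Char) (hch : ch ∈ ks) :
    (PySem.List.slice
        (ks.foldl (fun cs ch => cs.set ch.toNat (cs.getD ch.toNat 0 + 1))
          (List.replicate 256 (0 : Int)))
        none (some ((ch.toNat : Int)))).sum
      = ((ks.countP (fun x => decide (x < ch)) : Nat) : Int) := by
  rw [PySem.List.slice_to_natCast]
  rw [pv_prefix_sum ks hks ch.toNat (Nat.le_of_lt (hks ch hch))]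
  have hcong : ks.countP (fun x => decide (x.toNat < ch.toNat))
      = ks.countP (fun x => decide (x < ch)) := by
    apply List.countP_congr
    intro x _
    simp only [decide_eq_true_eq]
    exact (Char.lt_def.trans UInt32.lt_iff_toNat_lt).symm
  rw [hcong]

-- ===== VERDICT (by name: the statement is the Claim_ definition above) =====
theorem sattoloCycle_spec : Claim_equal_sattoloCycle := by
  intro items keyword hdom _
  have hks : ∀ ch ∈ keyword.toList, ch.toNat < 256 := by
    unfold Dom_sattoloCycle at hdom
    simp only [Bool.and_eq_true] at hdom
    intro ch hch
    have := List.all_eq_true.mp (by simpa [pvDomStr] using hdom.2) ch hch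
    simp only [pvDomChar, Bool.or_eq_true, Bool.and_eq_true, decide_eq_true_eq, beq_iff_eq] at this
    omega
  simp only [Spec_sattoloCycle, sattoloCycle, sattoloCycle_alt]
  rw [pv_keys_eq, List.foldl_map, pv_step_eq]
  congr 1
  apply PySem.List.foldl_congr_mem
  intro st ch hch
  rw [pv_key_eq keyword.toList hks ch hch]
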